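-- pv_equiv track=rewrite | github.com/yehric2018/dfam-pipeline | src/test_bin_genome.py | countGCAT
-- ===== SOURCE A (Python) =====
-- def countGCAT(seq):
--     """
--     countGCAT(seq) - Counts the number of GC bases and AT bases in
--     seq.
--
--     Args:
--         seq: A string of DNA nucleotides.
--
--     Returns:
--         A tuple (gc, at), where 'gc' is the count of G and C bases and
--         'at' is the count of A and T bases.
--     """
--     gc = 0
--     at = 0
--     for base in seq.lower():
--         if base == 'g' or base == 'c':
--             gc += 1
--         elif base == 'a' or base == 't':
--             at += 1
--     return (gc, at)
-- ===== SOURCE B (Python) =====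
-- def countGCAT(seq):
--     s = seq.lower()
--     return (s.count('g') + s.count('c'), s.count('a') + s.count('t'))
-- ===== Notes on version B (the rewrite author's own statement) =====
-- stated objective: idiomatic
-- what changed: Replaces the single branching per-character Python loop with four str.count library scans over the lowercased string, summed pairwise into the (gc, at) tuple.
import Mathlib
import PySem

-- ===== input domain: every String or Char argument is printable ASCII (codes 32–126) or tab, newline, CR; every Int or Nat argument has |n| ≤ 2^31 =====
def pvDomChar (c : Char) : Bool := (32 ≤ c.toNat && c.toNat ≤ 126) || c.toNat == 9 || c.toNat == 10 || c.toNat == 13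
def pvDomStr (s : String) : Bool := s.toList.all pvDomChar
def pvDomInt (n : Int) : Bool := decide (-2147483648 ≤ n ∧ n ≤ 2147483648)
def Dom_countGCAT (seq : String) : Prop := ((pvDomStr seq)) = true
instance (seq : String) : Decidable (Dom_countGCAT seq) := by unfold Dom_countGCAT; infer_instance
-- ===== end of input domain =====

-- B replaces A's single branching per-character loop by four str.count scans of the lowercased string (more idiomatic, same cost).


-- ===== PORT A =====
-- one pass over seq.lower(): per character, an if/elif updates the (gc, at) accumulator
def countGCAT (seq : String) : Int × Int :=
  (PySem.Str.lower seq).toList.foldl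
    (fun (p : Int × Int) base =>
      if base = 'g' ∨ base = 'c' then (p.1 + 1, p.2)
      else if base = 'a' ∨ base = 't' then (p.1, p.2 + 1)
      else p) (0, 0)

-- ===== PORT B =====
-- lowercase once, then four library count scans summed pairwise
def countGCAT_alt (seq : String) : Int × Int :=
  let s := PySem.Str.lower seq
  ((PySem.Str.count s "g" : Int) + (PySem.Str.count s "c" : Int),
   (PySem.Str.count s "a" : Int) + (PySem.Str.count s "t" : Int))

-- ===== PRECONDITION & SPEC =====
def Spec_countGCAT (seq : String) (out : Int × Int) : Prop := out = countGCAT_alt seq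
instance (seq : String) (out : Int × Int) : Decidable (Spec_countGCAT seq out) := by unfold Spec_countGCAT; infer_instance

-- ===== CLAIM (what is proved, stated in full; the proofs are below) =====
def Claim_equal_countGCAT : Prop := ∀ (seq : String), Dom_countGCAT seq → Spec_countGCAT seq (countGCAT seq)

-- ===== LEMMAS AND PROOFS =====

-- Chars.count.go with a one-character needle counts occurrences of that character
theorem pv_go_singleton (c : Char) :
    ∀ (l : List Char) (fuel acc : Nat), l.length ≤ fuel →
      PySem.Chars.count.go [c] fuel l acc = acc + l.count c := by
  intro l
  induction l with
  | nil =>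
      intro fuel acc _
      cases fuel <;> simp [PySem.Chars.count.go]
  | cons h t ih =>
      intro fuel acc hle
      cases fuel with
      | zero => simp at hle
      | succ f =>
        simp only [PySem.Chars.count.go, List.isPrefixOf, List.isPrefixOf_nil_left,
          Bool.and_true, List.length, List.drop]
        have hle' : t.length ≤ f := by simpa using hle
        by_cases hc : c = h
        · subst hc
          simp [ih f (acc + 1) hle', List.count_cons]
          omega
        · have hb : (c == h) = false := by simp [hc]
          simp [hb, List.count_cons, Ne.symm hc, ih f acc hle']

theorem pv_count_singleton (c : Char) (l : List Char) :
    PySem.Chars.count l [c] = l.count c := by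
  simp [PySem.Chars.count, pv_go_singleton c l l.length 0 (le_refl _)]

-- the branching fold computes the four character counts
theorem pv_fold_eq (l : List Char) : ∀ (gc at_ : Int),
    l.foldl
      (fun (p : Int × Int) base =>
        if base = 'g' ∨ base = 'c' then (p.1 + 1, p.2)
        else if base = 'a' ∨ base = 't' then (p.1, p.2 + 1)
        else p) (gc, at_)
    = (gc + l.count 'g' + l.count 'c', at_ + l.count 'a' + l.count 't') := by
  induction l with
  | nil => intro gc at_; simp
  | cons h t ih =>
      intro gc at_
      simp only [List.foldl_cons, List.count_cons]
      by_cases h1 : h = 'g' ∨ h = 'c'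
      · rcases h1 with h1 | h1 <;>
          · subst h1; simp [ih, Prod.ext_iff]; omega
      · by_cases h2 : h = 'a' ∨ h = 't'
        · rcases h2 with h2 | h2 <;>
            · subst h2; simp [h1, ih, Prod.ext_iff]; omega
        · have hg : ¬ h = 'g' := fun hh => h1 (Or.inl hh)
          have hc : ¬ h = 'c' := fun hh => h1 (Or.inr hh)
          have ha : ¬ h = 'a' := fun hh => h2 (Or.inl hh)
          have ht : ¬ h = 't' := fun hh => h2 (Or.inr hh)
          simp [h1, h2, hg, hc, ha, ht, ih]

-- ===== VERDICT (by name: the statement is the Claim_ definition above) =====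
theorem countGCAT_spec : Claim_equal_countGCAT := by
  intro seq _
  unfold Spec_countGCAT countGCAT countGCAT_alt
  simp [PySem.Str.count_eq, pv_count_singleton, pv_fold_eq]
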